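-- pv_equiv track=rewrite | github.com/Anubhav1603/Minesweeper-Game | MinesweeperGame.py | winorlose
-- ===== SOURCE A (Python) =====
-- def winorlose (numMines,row,col,bomb,dispBoard):
--     uncovered = 0
--     gameend = False
--     for i in range (row):
--         for u in range(col):
--             if dispBoard[i][u] != 'X' and dispBoard[i][u] != 'F' and dispBoard[i][u] !='*':
--                 uncovered = uncovered + 1
--             if dispBoard[i][u] == '*':  #IF YOU CLICKED ON BOMB
--                 gameend = True
--                 print ('YOU LOSE')
--                 return gameend
--
--     #If the number of empty spots without mines is equal to the number of spots uncovered, YOU WIN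
--     if (row * col) - numMines == uncovered:
--         wingame = True
--         gameend = True
--         print ()
--         print ('YOU WIN!')
--     return gameend
-- ===== SOURCE B (Python) =====
-- def winorlose(numMines, row, col, bomb, dispBoard):
--     # Pass 1: is any bomb visible?
--     if any(dispBoard[i][u] == '*' for i in range(row) for u in range(col)):
--         print('YOU LOSE')
--         return True
--     # Pass 2: count uncovered cells.
--     uncovered = sum(1 for i in range(row) for u in range(col)
--                     if dispBoard[i][u] not in ('X', 'F', '*'))
--     if row * col - numMines == uncovered:
--         print()
--         print('YOU WIN!')
--         return True
--     return False
-- ===== Notes on version B (the rewrite author's own statement) =====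
-- stated objective: alternative
-- what changed: Replaces A's fused single scan with a running counter and early return by two separate passes: a short-circuiting any() bomb-detection pass, then a sum() counting pass only when no bomb exists.
import Mathlib
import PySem

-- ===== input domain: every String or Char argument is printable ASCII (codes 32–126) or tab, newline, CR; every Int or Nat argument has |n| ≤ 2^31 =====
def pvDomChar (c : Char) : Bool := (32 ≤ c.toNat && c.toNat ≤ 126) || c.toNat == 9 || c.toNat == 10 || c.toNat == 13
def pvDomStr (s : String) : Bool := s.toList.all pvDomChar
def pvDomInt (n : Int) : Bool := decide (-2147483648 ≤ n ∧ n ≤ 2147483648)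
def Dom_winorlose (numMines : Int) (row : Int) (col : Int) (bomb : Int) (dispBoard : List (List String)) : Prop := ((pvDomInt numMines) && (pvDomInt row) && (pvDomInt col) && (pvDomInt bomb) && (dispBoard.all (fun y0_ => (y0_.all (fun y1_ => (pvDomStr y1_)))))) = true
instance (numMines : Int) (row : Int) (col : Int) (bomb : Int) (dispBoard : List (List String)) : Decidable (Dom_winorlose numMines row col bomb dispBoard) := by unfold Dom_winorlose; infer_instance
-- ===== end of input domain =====

-- B replaces A's fused early-return scan by two separate passes (short-circuiting bomb detection, then counting);
-- objective: alternative decomposition, same cost. Prints are side effects outside the proved return-value equivalence.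

-- ===== PORT A =====
-- dispBoard[i][u] (both indices nonnegative here); default only reached outside Pre_
def pvCell (d : List (List String)) (i u : Int) : String :=
  PySem.List.pyGetD (PySem.List.pyGetD d i []) u ""

-- inner 'for u in range(col)': none = the 'return gameend' on a bomb
def pvA_inner (d : List (List String)) (i : Int) (us : List Int) (uncovered : Int) : Option Int :=
  match us with
  | [] => some uncovered
  | u :: rest =>
    let cell := pvCell d i u
    let uncovered' := if cell ≠ "X" ∧ cell ≠ "F" ∧ cell ≠ "*" then uncovered + 1 else uncovered
    if cell = "*" then none else pvA_inner d i rest uncovered'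

-- outer 'for i in range(row)'
def pvA_outer (d : List (List String)) (col : Int) (is : List Int) (uncovered : Int) : Option Int :=
  match is with
  | [] => some uncovered
  | i :: rest =>
    match pvA_inner d i (PySem.List.pyRange 0 col 1) uncovered with
    | none => none
    | some u' => pvA_outer d col rest u'

def winorlose (numMines : Int) (row : Int) (col : Int) (bomb : Int) (dispBoard : List (List String)) : Bool :=
  match pvA_outer dispBoard col (PySem.List.pyRange 0 row 1) 0 with
  | none => true  -- bomb: printed 'YOU LOSE', returned True
  | some uncovered => if row * col - numMines = uncovered then true else false

-- ===== PORT B =====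
def winorlose_alt (numMines : Int) (row : Int) (col : Int) (bomb : Int) (dispBoard : List (List String)) : Bool :=
  if (PySem.List.pyRange 0 row 1).any (fun i =>
       (PySem.List.pyRange 0 col 1).any (fun u => pvCell dispBoard i u == "*")) then
    true  -- printed 'YOU LOSE'
  else
    let uncovered : Int :=
      (PySem.List.pyRange 0 row 1).foldl (fun acc i =>
        (PySem.List.pyRange 0 col 1).foldl (fun acc2 u =>
          if ¬(pvCell dispBoard i u = "X" ∨ pvCell dispBoard i u = "F" ∨ pvCell dispBoard i u = "*")
          then acc2 + 1 else acc2) acc) 0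
    if row * col - numMines = uncovered then true else false

-- ===== PRECONDITION & SPEC =====
-- Pre_ excludes exactly the inputs on which Python's dispBoard[i][u] raises IndexError: A (and B,
-- whose any() short-circuits in the same scan order) returns normally iff either every scanned
-- position is in range, or some in-range '*' cell precedes (in scan order) every out-of-range position.
def Pre_winorlose (numMines : Int) (row : Int) (col : Int) (bomb : Int) (dispBoard : List (List String)) : Prop :=
  col ≤ 0 ∨
  (row.toNat ≤ dispBoard.length ∧
    ∀ r ∈ dispBoard.take row.toNat, col.toNat ≤ r.length) ∨
  (∃ i < min row.toNat dispBoard.length,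
    ∃ u < min col.toNat (dispBoard.getD i []).length,
      (dispBoard.getD i []).getD u "" = "*" ∧
      ∀ i' < i, col.toNat ≤ (dispBoard.getD i' []).length)
instance (numMines : Int) (row : Int) (col : Int) (bomb : Int) (dispBoard : List (List String)) : Decidable (Pre_winorlose numMines row col bomb dispBoard) := by unfold Pre_winorlose; infer_instance

def pvWitness_winorlose : Int × Int × Int × Int × List (List String) := (0, 1, 1, 0, [["X"]])

def Spec_winorlose (numMines : Int) (row : Int) (col : Int) (bomb : Int) (dispBoard : List (List String)) (out : Bool) : Prop := out = winorlose_alt numMines row col bomb dispBoard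
instance (numMines : Int) (row : Int) (col : Int) (bomb : Int) (dispBoard : List (List String)) (out : Bool) : Decidable (Spec_winorlose numMines row col bomb dispBoard out) := by unfold Spec_winorlose; infer_instance

-- ===== CLAIM (what is proved, stated in full; the proofs are below) =====
def Claim_equal_winorlose : Prop := ∀ (numMines : Int) (row : Int) (col : Int) (bomb : Int) (dispBoard : List (List String)), Dom_winorlose numMines row col bomb dispBoard → Pre_winorlose numMines row col bomb dispBoard → Spec_winorlose numMines row col bomb dispBoard (winorlose numMines row col bomb dispBoard)

-- ===== LEMMAS AND PROOFS =====
theorem pvStep_eq (d : List (List String)) (i : Int) :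
    (fun (a u : Int) =>
      if ¬(pvCell d i u = "X" ∨ pvCell d i u = "F" ∨ pvCell d i u = "*") then a + 1 else a) =
    (fun (a u : Int) =>
      if pvCell d i u ≠ "X" ∧ pvCell d i u ≠ "F" ∧ pvCell d i u ≠ "*" then a + 1 else a) := by
  funext a u
  split_ifs with h1 h2 <;> first | rfl | tauto

theorem pvA_inner_eq (d : List (List String)) (i : Int) :
    ∀ (us : List Int) (acc : Int),
      pvA_inner d i us acc =
        if us.any (fun u => pvCell d i u == "*") then none
        else some (us.foldl (fun a u =>
          if pvCell d i u ≠ "X" ∧ pvCell d i u ≠ "F" ∧ pvCell d i u ≠ "*"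
          then a + 1 else a) acc) := by
  intro us
  induction us with
  | nil => intro acc; simp [pvA_inner]
  | cons u rest ih =>
    intro acc
    by_cases h : pvCell d i u = "*"
    · simp [pvA_inner, h]
    · have hb : (pvCell d i u == "*") = false := by simp [h]
      simp only [pvA_inner, List.any_cons, List.foldl_cons, hb, Bool.false_or, if_neg h, ih]

theorem pvA_outer_eq (d : List (List String)) (col : Int) :
    ∀ (is : List Int) (acc : Int),
      pvA_outer d col is acc =
        if is.any (fun i => (PySem.List.pyRange 0 col 1).any (fun u => pvCell d i u == "*")) then none
        else some (is.foldl (fun acc2 i =>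
          (PySem.List.pyRange 0 col 1).foldl (fun a u =>
            if pvCell d i u ≠ "X" ∧ pvCell d i u ≠ "F" ∧ pvCell d i u ≠ "*"
            then a + 1 else a) acc2) acc) := by
  intro is
  induction is with
  | nil => intro acc; simp [pvA_outer]
  | cons i rest ih =>
    intro acc
    simp only [pvA_outer, List.any_cons, List.foldl_cons, pvA_inner_eq]
    cases hX : (PySem.List.pyRange 0 col 1).any (fun u => pvCell d i u == "*") with
    | true => simp [hX]
    | false => simp only [Bool.false_or, if_neg Bool.false_ne_true, ih]

-- ===== VERDICT (by name: the statement is the Claim_ definition above) =====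
theorem winorlose_spec : Claim_equal_winorlose := by
  intro numMines row col bomb dispBoard _ _
  unfold Spec_winorlose winorlose winorlose_alt
  simp only [pvStep_eq]
  rw [pvA_outer_eq]
  cases hB : (PySem.List.pyRange 0 row 1).any
      (fun i => (PySem.List.pyRange 0 col 1).any (fun u => pvCell dispBoard i u == "*")) with
  | true => simp
  | false => simp
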